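-- pv_equiv track=rewrite | github.com/flynncao/Cantonese-ASR-Wav2vec2-XLRS-transfer-learning-project | joint model experiment/ctc_alignment.py | ctc_alignment
-- ===== SOURCE A (Python) =====
-- def ctc_alignment(predictions, targets, blank_id=0):
--     """
--     进行 CTC 对齐。
--
--     参数:
--         predictions (list): 模型预测的字符 ID 列表。
--         targets (list): 真实标签的字符 ID 列表。
--         blank_id (int): 空白标签的 ID,默认为 0。
--
--     返回:
--         list: 对齐后的预测字符 ID 列表。
--     """
--     aligned_predictions = []
--     previous_char = None
--
--     for pred_char, target_char in zip(predictions, targets):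
--         if pred_char != blank_id and pred_char != previous_char:
--             aligned_predictions.append(pred_char)
--         previous_char = pred_char
--
--     return aligned_predictions
-- ===== SOURCE B (Python) =====
-- def ctc_alignment(predictions, targets, blank_id=0):
--     # Run-at-a-time scan: the outer loop lands on the first index of each run,
--     # emits its value unless blank, and the inner loop skips the rest of the run.
--     n = len(predictions) if len(predictions) < len(targets) else len(targets)
--     out = []
--     i = 0
--     while i < n:
--         x = predictions[i]
--         if x != blank_id:
--             out.append(x)
--         i += 1
--         while i < n and predictions[i] == x:
--             i += 1
--     return out
-- ===== Notes on version B (the rewrite author's own statement) =====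
-- stated objective: alternative
-- what changed: Replaces A's element-wise zip fold with a previous_char state variable by a stateless run-at-a-time scan: truncate to the min length once, then an outer loop that visits only the first index of each maximal run (emitting it unless blank) while an inner loop skips over the rest of the run.
import Mathlib
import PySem

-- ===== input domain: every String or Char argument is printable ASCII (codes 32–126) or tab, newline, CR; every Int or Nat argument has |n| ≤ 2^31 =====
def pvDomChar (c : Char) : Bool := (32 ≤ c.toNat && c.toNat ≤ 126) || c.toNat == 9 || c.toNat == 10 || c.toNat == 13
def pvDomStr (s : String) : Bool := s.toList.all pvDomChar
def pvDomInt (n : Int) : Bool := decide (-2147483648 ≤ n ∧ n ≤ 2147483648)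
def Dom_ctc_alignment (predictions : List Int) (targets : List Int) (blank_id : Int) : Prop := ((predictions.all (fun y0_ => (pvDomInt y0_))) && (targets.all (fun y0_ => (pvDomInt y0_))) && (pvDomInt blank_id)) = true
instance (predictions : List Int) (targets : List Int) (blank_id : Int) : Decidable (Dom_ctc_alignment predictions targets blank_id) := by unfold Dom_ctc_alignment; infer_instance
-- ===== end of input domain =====

-- B replaces A's element-wise zip fold with previous_char state by a run-at-a-time scan that skips each maximal run after emitting its first element (alternative decomposition, same cost).


-- ===== PORT A =====
-- loop state: (aligned_predictions, previous_char); previous_char starts as None, and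
-- Python's `pred_char != previous_char` against None is always True, i.e. some pred ≠ prev here
def ctc_alignment (predictions : List Int) (targets : List Int) (blank_id : Int) : List Int :=
  (List.foldl
    (fun (st : List Int × Option Int) (pt : Int × Int) =>
      if pt.1 ≠ blank_id ∧ some pt.1 ≠ st.2
      then (st.1 ++ [pt.1], some pt.1)
      else (st.1, some pt.1))
    ([], none) (predictions.zip targets)).1

-- ===== PORT B =====
-- outer while loop of Source B: lands on the head of each run; the inner
-- `while i < n and predictions[i] == x: i += 1` run-skip is dropWhile (== x)
def pvRuns (b : Int) : List Int → List Int
  | [] => []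
  | x :: xs =>
    (if x ≠ b then [x] else []) ++ pvRuns b (xs.dropWhile (fun y => y == x))
termination_by l => l.length
decreasing_by simpa using Nat.lt_succ_of_le (List.length_dropWhile_le _ _)

def ctc_alignment_alt (predictions : List Int) (targets : List Int) (blank_id : Int) : List Int :=
  let n := if predictions.length < targets.length then predictions.length else targets.length
  pvRuns blank_id (predictions.take n)

-- ===== PRECONDITION & SPEC =====
def Spec_ctc_alignment (predictions : List Int) (targets : List Int) (blank_id : Int) (out : List Int) : Prop := out = ctc_alignment_alt predictions targets blank_id
instance (predictions : List Int) (targets : List Int) (blank_id : Int) (out : List Int) : Decidable (Spec_ctc_alignment predictions targets blank_id out) := by unfold Spec_ctc_alignment; infer_instance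

-- ===== CLAIM (what is proved, stated in full; the proofs are below) =====
def Claim_equal_ctc_alignment : Prop := ∀ (predictions : List Int) (targets : List Int) (blank_id : Int), Dom_ctc_alignment predictions targets blank_id → Spec_ctc_alignment predictions targets blank_id (ctc_alignment predictions targets blank_id)

-- ===== LEMMAS AND PROOFS =====

-- A's loop, as a recursion on the truncated prediction sequence (prev = previous_char)
def pvF (b : Int) (prev : Option Int) : List Int → List Int
  | [] => []
  | x :: xs =>
    if some x = prev then pvF b prev xs
    else if x = b then pvF b (some x) xs
    else x :: pvF b (some x) xs

theorem pvA_foldl (b : Int) (p : List Int) : ∀ (t : List Int) (acc : List Int) (prev : Option Int),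
    (List.foldl
      (fun (st : List Int × Option Int) (pt : Int × Int) =>
        if pt.1 ≠ b ∧ some pt.1 ≠ st.2
        then (st.1 ++ [pt.1], some pt.1)
        else (st.1, some pt.1))
      (acc, prev) (p.zip t)).1
    = acc ++ pvF b prev (p.take (min p.length t.length)) := by
  induction p with
  | nil => intro t acc prev; simp [pvF]
  | cons x xs ih =>
    intro t acc prev
    cases t with
    | nil => simp [pvF]
    | cons y ys =>
      simp only [List.zip_cons_cons, List.foldl_cons, List.length_cons]
      have hmin : min (xs.length + 1) (ys.length + 1) = min xs.length ys.length + 1 := by omega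
      rw [hmin]
      simp only [List.take_succ_cons, pvF]
      by_cases hb : x = b
      · have hc : ¬ (x ≠ b ∧ some x ≠ prev) := by simp [hb]
        rw [if_neg hc, ih]
        by_cases h : some x = prev
        · rw [if_pos h, ← h]
        · rw [if_neg h, if_pos hb]
      · by_cases h : some x = prev
        · have hc : ¬ (x ≠ b ∧ some x ≠ prev) := by simp [h]
          rw [if_neg hc, ih, if_pos h, ← h]
        · rw [if_pos ⟨hb, h⟩, ih, if_neg h, if_neg hb]
          simp

theorem pvF_some_dropWhile (b x : Int) (l : List Int) :
    pvF b (some x) l = pvF b (some x) (l.dropWhile (fun y => y == x)) := by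
  induction l with
  | nil => rfl
  | cons y ys ih =>
    by_cases h : y = x
    · subst h
      simpa [pvF, List.dropWhile] using ih
    · have hyx : (y == x) = false := by simpa using h
      simp [List.dropWhile, hyx]

theorem pvDropWhile_head_false (p : Int → Bool) : ∀ (l : List Int) (z : Int) (zs : List Int),
    l.dropWhile p = z :: zs → p z = false := by
  intro l
  induction l with
  | nil => intro z zs h; simp [List.dropWhile] at h
  | cons y ys ih =>
    intro z zs h
    by_cases hp : p y = true
    · exact ih z zs (by simpa [List.dropWhile, hp] using h)
    · have hp' : p y = false := by simpa using hp
      rw [List.dropWhile, hp'] at h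
      cases h; exact hp'

theorem pvF_none_eq_pvRuns (b : Int) : ∀ (l : List Int), pvF b none l = pvRuns b l
  | [] => by simp [pvF, pvRuns]
  | x :: xs => by
    rw [pvRuns]
    have hrec := pvF_none_eq_pvRuns b (xs.dropWhile (fun y => y == x))
    have hd : pvF b (some x) (xs.dropWhile (fun y => y == x))
        = pvF b none (xs.dropWhile (fun y => y == x)) := by
      cases hds : xs.dropWhile (fun y => y == x) with
      | nil => rfl
      | cons z zs =>
        have hzx : z ≠ x := by
          simpa using pvDropWhile_head_false (fun y => y == x) xs z zs hds
        simp [pvF, hzx]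
    by_cases hb : x = b
    · subst hb
      simp [pvF, pvF_some_dropWhile, hd, hrec]
    · simp [pvF, hb, pvF_some_dropWhile, hd, hrec]
termination_by l => l.length
decreasing_by simpa using Nat.lt_succ_of_le (List.length_dropWhile_le _ _)

-- ===== VERDICT (by name: the statement is the Claim_ definition above) =====
theorem ctc_alignment_spec : Claim_equal_ctc_alignment := by
  intro p t b _
  show ctc_alignment p t b = ctc_alignment_alt p t b
  simp only [ctc_alignment, ctc_alignment_alt]
  rw [pvA_foldl]
  have hn : (if p.length < t.length then p.length else t.length) = min p.length t.length := by
    by_cases h : p.length < t.length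
    · simp [h, Nat.min_eq_left (Nat.le_of_lt h)]
    · simp [h, Nat.min_eq_right (Nat.le_of_not_lt h)]
  rw [hn, pvF_none_eq_pvRuns]
  simp
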